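-- pv_equiv track=rewrite | github.com/bayve711/JKU_Python_1 | assignment 5/ex2.py | gen_range
-- ===== SOURCE A (Python) =====
-- def gen_range(start: int, stop: int, step: int = 1):
--     if isinstance(start, int) is False or isinstance(stop, int) is False or isinstance(step, int) is False:
--         raise TypeError
--     if step == 0:
--         raise ValueError
--     if step > 0:
--        i = start
--        while i <= stop:
--             yield i
--             i += 1*step
--     else:
--         i = start
--         while i >= stop:
--             yield i
--             i += 1 * step
-- ===== SOURCE B (Python) =====
-- def gen_range(start: int, stop: int, step: int = 1):
--     if isinstance(start, int) is False or isinstance(stop, int) is False or isinstance(step, int) is False: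
--         raise TypeError
--     if step == 0:
--         raise ValueError
--     n = max(0, (stop - start) // step + 1)
--     for i in range(n):
--         yield start + step * i
-- ===== Notes on version B (the rewrite author's own statement) =====
-- stated objective: simpler
-- what changed: Replaces the two sign-split while loops with a closed-form element count n = max(0,(stop-start)//step+1) and a single for-loop yielding start+step*i.
import Mathlib
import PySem

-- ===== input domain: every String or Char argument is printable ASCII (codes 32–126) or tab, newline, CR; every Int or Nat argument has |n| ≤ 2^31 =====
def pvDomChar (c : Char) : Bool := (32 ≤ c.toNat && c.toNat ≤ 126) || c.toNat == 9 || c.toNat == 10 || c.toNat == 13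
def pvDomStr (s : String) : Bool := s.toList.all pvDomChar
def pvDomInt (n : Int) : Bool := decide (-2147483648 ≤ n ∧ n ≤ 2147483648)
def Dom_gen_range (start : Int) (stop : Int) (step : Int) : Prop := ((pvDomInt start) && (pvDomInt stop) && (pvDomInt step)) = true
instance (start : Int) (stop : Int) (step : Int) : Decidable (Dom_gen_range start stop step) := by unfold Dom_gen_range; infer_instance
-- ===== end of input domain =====

-- B replaces A's two sign-split while loops by a closed-form element count and one indexed loop (objective: simpler).

-- ===== PORT A =====
-- while i <= stop: yield i; i += 1*step   (branch step > 0)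
def pvLoopUp (stop step : Int) (hs : 0 < step) (i : Int) : List Int :=
  if i ≤ stop then i :: pvLoopUp stop step hs (i + 1 * step) else []
termination_by (stop + 1 - i).toNat
decreasing_by omega

-- while i >= stop: yield i; i += 1*step   (branch step < 0)
def pvLoopDown (stop step : Int) (hs : step < 0) (i : Int) : List Int :=
  if stop ≤ i then i :: pvLoopDown stop step hs (i + 1 * step) else []
termination_by (i + 1 - stop).toNat
decreasing_by omega

def gen_range (start : Int) (stop : Int) (step : Int) : List Int :=
  if h : 0 < step then pvLoopUp stop step h start
  else if h' : step < 0 then pvLoopDown stop step h' start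
  else []  -- step = 0: Python raises ValueError; excluded by Pre_

-- ===== PORT B =====
def gen_range_alt (start : Int) (stop : Int) (step : Int) : List Int :=
  let n := max 0 (PySem.Int.floordiv (stop - start) step + 1)
  (List.range n.toNat).map (fun i : Nat => start + step * (i : Int))

-- ===== PRECONDITION & SPEC =====
-- step = 0 makes Python's A raise ValueError (and B too), so it is excluded.
def Pre_gen_range (start : Int) (stop : Int) (step : Int) : Prop := step ≠ 0
instance (start : Int) (stop : Int) (step : Int) : Decidable (Pre_gen_range start stop step) := by unfold Pre_gen_range; infer_instance
def pvWitness_gen_range : Int × Int × Int := (1, 7, 2)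

def Spec_gen_range (start : Int) (stop : Int) (step : Int) (out : List Int) : Prop := out = gen_range_alt start stop step
instance (start : Int) (stop : Int) (step : Int) (out : List Int) : Decidable (Spec_gen_range start stop step out) := by unfold Spec_gen_range; infer_instance

-- ===== CLAIM (what is proved, stated in full; the proofs are below) =====
def Claim_equal_gen_range : Prop := ∀ (start : Int) (stop : Int) (step : Int), Dom_gen_range start stop step → Pre_gen_range start stop step → Spec_gen_range start stop step (gen_range start stop step)

-- ===== LEMMAS AND PROOFS =====

-- closed-form count for B, as a function of the current cursor
def pvCnt (stop step i : Int) : Nat := (max 0 (PySem.Int.floordiv (stop - i) step + 1)).toNat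

lemma pvCnt_zero_up (stop step i : Int) (hs : 0 < step) (h : ¬ i ≤ stop) :
    pvCnt stop step i = 0 := by
  unfold pvCnt
  have : PySem.Int.floordiv (stop - i) step < 0 := by
    rw [PySem.Int.floordiv_lt_iff_lt_mul hs]; omega
  omega

lemma pvCnt_succ_up (stop step i : Int) (hs : 0 < step) (h : i ≤ stop) :
    pvCnt stop step i = pvCnt stop step (i + step) + 1 := by
  unfold pvCnt
  set q := PySem.Int.floordiv (stop - i) step with hq
  have hqnn : 0 ≤ q := by
    rw [hq, PySem.Int.le_floordiv_iff_mul_le hs]; omega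
  have hbr : q * step ≤ stop - i ∧ stop - i < (q + 1) * step :=
    (PySem.Int.floordiv_eq_iff_of_pos hs).mp hq.symm
  have h2 : PySem.Int.floordiv (stop - (i + step)) step = q - 1 := by
    rw [PySem.Int.floordiv_eq_iff_of_pos hs]
    constructor <;> nlinarith [hbr.1, hbr.2]
  rw [h2]; omega

lemma pvLoopUp_eq (stop step : Int) (hs : 0 < step) (i : Int) :
    pvLoopUp stop step hs i =
      (List.range (pvCnt stop step i)).map (fun k : Nat => i + step * (k : Int)) := by
  fun_induction pvLoopUp stop step hs i with
  | case1 i h ih =>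
    rw [ih, pvCnt_succ_up stop step i hs h, List.range_succ_eq_map]
    simp only [List.map_cons, List.map_map, Nat.cast_zero, mul_zero, add_zero, one_mul,
      List.cons.injEq, true_and]
    apply List.map_congr_left
    intro k _
    simp only [Function.comp_apply]
    push_cast
    ring
  | case2 i h =>
    rw [pvCnt_zero_up stop step i hs h]; simp

lemma pvCnt_zero_down (stop step i : Int) (hs : step < 0) (h : ¬ stop ≤ i) :
    pvCnt stop step i = 0 := by
  unfold pvCnt
  have hrw : PySem.Int.floordiv (stop - i) step = PySem.Int.floordiv (-(stop - i)) (-step) := by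
    rw [← PySem.Int.floordiv_neg_neg]
  have : PySem.Int.floordiv (-(stop - i)) (-step) < 0 := by
    rw [PySem.Int.floordiv_lt_iff_lt_mul (by omega : (0:Int) < -step)]; omega
  omega

lemma pvCnt_succ_down (stop step i : Int) (hs : step < 0) (h : stop ≤ i) :
    pvCnt stop step i = pvCnt stop step (i + step) + 1 := by
  unfold pvCnt
  have hb : (0:Int) < -step := by omega
  have hrw1 : PySem.Int.floordiv (stop - i) step = PySem.Int.floordiv (i - stop) (-step) := by
    rw [← PySem.Int.floordiv_neg_neg]; ring_nf
  have hrw2 : PySem.Int.floordiv (stop - (i + step)) step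
      = PySem.Int.floordiv ((i + step) - stop) (-step) := by
    rw [← PySem.Int.floordiv_neg_neg]; ring_nf
  rw [hrw1, hrw2]
  set q := PySem.Int.floordiv (i - stop) (-step) with hq
  have hqnn : 0 ≤ q := by
    rw [hq, PySem.Int.le_floordiv_iff_mul_le hb]; omega
  have hbr : q * (-step) ≤ i - stop ∧ i - stop < (q + 1) * (-step) :=
    (PySem.Int.floordiv_eq_iff_of_pos hb).mp hq.symm
  have h2 : PySem.Int.floordiv ((i + step) - stop) (-step) = q - 1 := by
    rw [PySem.Int.floordiv_eq_iff_of_pos hb]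
    constructor <;> nlinarith [hbr.1, hbr.2]
  rw [h2]; omega

lemma pvLoopDown_eq (stop step : Int) (hs : step < 0) (i : Int) :
    pvLoopDown stop step hs i =
      (List.range (pvCnt stop step i)).map (fun k : Nat => i + step * (k : Int)) := by
  fun_induction pvLoopDown stop step hs i with
  | case1 i h ih =>
    rw [ih, pvCnt_succ_down stop step i hs h, List.range_succ_eq_map]
    simp only [List.map_cons, List.map_map, Nat.cast_zero, mul_zero, add_zero, one_mul,
      List.cons.injEq, true_and]
    apply List.map_congr_left
    intro k _
    simp only [Function.comp_apply]
    push_cast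
    ring
  | case2 i h =>
    rw [pvCnt_zero_down stop step i hs h]; simp

-- ===== VERDICT (by name: the statement is the Claim_ definition above) =====
theorem gen_range_spec : Claim_equal_gen_range := by
  intro start stop step _ hpre
  unfold Spec_gen_range gen_range gen_range_alt
  split
  · next h => rw [pvLoopUp_eq]; rfl
  · next h =>
    split
    · next h' => rw [pvLoopDown_eq]; rfl
    · next h' => exact absurd (by omega : step = 0) hpre
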